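-- pv_equiv track=rewrite | github.com/PyExtr/pink-floyd | Pink_Floyd_DB.py | discographyGenerator
-- ===== SOURCE A (Python) =====
-- def discographyGenerator(f):  # Generate discography dictionaries from "Pink_Floyd_DB.TXT"
--     discography, songTime = dict(), dict()
--     album, song, lyrics, long, flag = '', '', '', '', 0
--
--     for x in f:
--         # album
--         if x[0] == '#':
--             if lyrics != '':
--                 discography[album][song] = lyrics
--                 song, album = '', ''
--             lyrics = ''
--             for c in x[1:-1]:
--                 if c == ':':
--                     flag += 1
--                 elif flag == 2:
--                     continue
--                 else:
--                     album += c.lower()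
--             discography[album] = dict()
--             flag = 0
--
--         # songs
--         elif x[0] == '*':
--             if lyrics != '':
--                 discography[album][song] = lyrics
--                 song = ''
--             lyrics = ''
--             for c in x[1:-1]:
--                 if c == ':':
--                     flag += 1
--                 elif flag == 0:
--                     song += c.lower()
--                 elif flag == 4 or flag == 5:
--                     long += c
--                 elif flag == 7:
--                     lyrics += c.lower()
--             lyrics += ' '
--             long = long[:2] + ':' + long[2:]
--             songTime[song] = long
--             discography[album][song] = None
--             long = ''
--             flag = 0
--
--         # lyrics
--         else:
--             for c in x[:-1]:
--                 lyrics += c.lower()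
--             lyrics += ' '
--
--     # in case of the final lyrics
--     if lyrics != '':
--         discography[album][song] = lyrics
--
--     return discography, songTime
-- ===== SOURCE B (Python) =====
-- def discographyGenerator(f):  # split-on-':' field parsing instead of char-by-char flag counting
--     discography, songTime = dict(), dict()
--     album, song, lyrics = '', '', ''
--
--     for x in f:
--         if x[0] == '#':
--             if lyrics != '':
--                 discography[album][song] = lyrics
--                 song, album = '', ''
--             lyrics = ''
--             fields = x[1:-1].split(':')
--             album += ''.join(fld.lower() for i, fld in enumerate(fields) if i != 2)
--             discography[album] = dict()
--         elif x[0] == '*':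
--             if lyrics != '':
--                 discography[album][song] = lyrics
--                 song = ''
--             fields = x[1:-1].split(':')
--             song += fields[0].lower()
--             long = (fields[4] if len(fields) > 4 else '') + (fields[5] if len(fields) > 5 else '')
--             lyrics = (fields[7].lower() if len(fields) > 7 else '') + ' '
--             songTime[song] = long[:2] + ':' + long[2:]
--             discography[album][song] = None
--         else:
--             lyrics += x[:-1].lower() + ' '
--
--     if lyrics != '':
--         discography[album][song] = lyrics
--
--     return discography, songTime
-- ===== Notes on version B (the rewrite author's own statement) =====
-- stated objective: simpler
-- what changed: Each inner char-by-char colon-counting state machine (flag/long accumulators) is replaced by splitting the line on ':' once and indexing the resulting fields; the outer per-line dispatch and dict bookkeeping stay.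
import Mathlib
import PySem

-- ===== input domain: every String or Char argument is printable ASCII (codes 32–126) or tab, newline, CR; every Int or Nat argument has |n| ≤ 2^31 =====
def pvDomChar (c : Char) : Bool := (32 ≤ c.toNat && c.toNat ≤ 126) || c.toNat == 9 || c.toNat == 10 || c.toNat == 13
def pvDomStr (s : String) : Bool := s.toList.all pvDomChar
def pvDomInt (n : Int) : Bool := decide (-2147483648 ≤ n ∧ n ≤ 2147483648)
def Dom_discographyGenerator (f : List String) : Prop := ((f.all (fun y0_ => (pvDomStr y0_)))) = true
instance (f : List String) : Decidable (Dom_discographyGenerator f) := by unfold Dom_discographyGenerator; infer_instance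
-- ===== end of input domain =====

-- B replaces A's char-by-char colon-counting state machines with one split on ':' per line
-- and field indexing (objective: simpler); the outer per-line dispatch stays.

-- ===== PORT A =====
-- A-side helpers. Dicts are PySem.Dict; the nested `discography[album][song] = v` is
-- `modify` with default `empty`: in Python a missing album is a KeyError, which happens
-- only outside Pre_ (inside Pre_ the album key is always present, where modify agrees).
def pvA_flush (disc : PySem.Dict String (PySem.Dict String (Option String)))
    (album song lyr : List Char) : PySem.Dict String (PySem.Dict String (Option String)) :=
  disc.modify (String.ofList album) PySem.Dict.empty
    (fun d => d.insert (String.ofList song) (some (String.ofList lyr)))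

-- the `for c in x[1:-1]` body of the '#' branch, state (album, flag)
def pvA_hashStep (st : List Char × Nat) (c : Char) : List Char × Nat :=
  if c = ':' then (st.1, st.2 + 1)
  else if st.2 = 2 then st
  else (st.1 ++ [PySem.Chars.lowerChar c], st.2)

-- the `for c in x[1:-1]` body of the '*' branch, state ((song, long, lyrics), flag)
def pvA_starStep (st : (List Char × List Char × List Char) × Nat) (c : Char) :
    (List Char × List Char × List Char) × Nat :=
  if c = ':' then (st.1, st.2 + 1)
  else if st.2 = 0 then ((st.1.1 ++ [PySem.Chars.lowerChar c], st.1.2.1, st.1.2.2), st.2)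
  else if st.2 = 4 ∨ st.2 = 5 then ((st.1.1, st.1.2.1 ++ [c], st.1.2.2), st.2)
  else if st.2 = 7 then ((st.1.1, st.1.2.1, st.1.2.2 ++ [PySem.Chars.lowerChar c]), st.2)
  else st

-- one iteration of A's `for x in f` loop; state (discography, songTime, album, song, lyrics, long, flag)
def pvA_line
    (st : PySem.Dict String (PySem.Dict String (Option String)) × PySem.Dict String String ×
          List Char × List Char × List Char × List Char × Nat) (x : String) :
    PySem.Dict String (PySem.Dict String (Option String)) × PySem.Dict String String ×
      List Char × List Char × List Char × List Char × Nat :=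
  match x.toList with
  | [] => st  -- Python raises IndexError on x[0] here (excluded by Pre_)
  | c :: _ =>
    match st with
    | (disc, songT, album, song, lyr, long, flag) =>
      if c = '#' then
        let disc' := if lyr ≠ [] then pvA_flush disc album song lyr else disc
        let song' := if lyr ≠ [] then [] else song
        let album' := if lyr ≠ [] then [] else album
        let p := (PySem.List.slice x.toList (some 1) (some (-1))).foldl pvA_hashStep (album', flag)
        (disc'.insert (String.ofList p.1) PySem.Dict.empty, songT, p.1, song', [], long, 0)
      else if c = '*' then
        let disc' := if lyr ≠ [] then pvA_flush disc album song lyr else disc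
        let song' := if lyr ≠ [] then [] else song
        let q := (PySem.List.slice x.toList (some 1) (some (-1))).foldl pvA_starStep ((song', long, []), flag)
        let lo := q.1.2.1.take 2 ++ [':'] ++ q.1.2.1.drop 2  -- long[:2] + ':' + long[2:]
        (disc'.modify (String.ofList album) PySem.Dict.empty
           (fun d => d.insert (String.ofList q.1.1) none),
         songT.insert (String.ofList q.1.1) (String.ofList lo),
         album, q.1.1, q.1.2.2 ++ [' '], [], 0)
      else
        (disc, songT, album, song,
         (PySem.List.slice x.toList none (some (-1))).foldl
           (fun l ch => l ++ [PySem.Chars.lowerChar ch]) lyr ++ [' '],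
         long, flag)

def discographyGenerator (f : List String) : (List (String × List (String × Option String))) × (List (String × String)) :=
  match f.foldl pvA_line (PySem.Dict.empty, PySem.Dict.empty, [], [], [], [], 0) with
  | (disc, songT, album, song, lyr, _, _) =>
    let disc' := if lyr ≠ [] then pvA_flush disc album song lyr else disc
    (disc'.items.map (fun p => (p.1, p.2.items)), songT.items)

-- ===== PORT B =====
-- B-side helpers (same Dict conventions as above).
def pvB_flush (disc : PySem.Dict String (PySem.Dict String (Option String)))
    (album song lyr : List Char) : PySem.Dict String (PySem.Dict String (Option String)) :=
  disc.modify (String.ofList album) PySem.Dict.empty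
    (fun d => d.insert (String.ofList song) (some (String.ofList lyr)))

-- fields = x[1:-1].split(':')
def pvB_fields (x : String) : List (List Char) :=
  PySem.Chars.splitOn (PySem.List.slice x.toList (some 1) (some (-1))) [':']

-- one iteration of B's `for x in f` loop; state (discography, songTime, album, song, lyrics)
def pvB_line
    (st : PySem.Dict String (PySem.Dict String (Option String)) × PySem.Dict String String ×
          List Char × List Char × List Char) (x : String) :
    PySem.Dict String (PySem.Dict String (Option String)) × PySem.Dict String String ×
      List Char × List Char × List Char :=
  match x.toList with
  | [] => st  -- Python raises IndexError on x[0] here (excluded by Pre_)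
  | c :: _ =>
    match st with
    | (disc, songT, album, song, lyr) =>
      if c = '#' then
        let disc' := if lyr ≠ [] then pvB_flush disc album song lyr else disc
        let fields := pvB_fields x
        -- album += ''.join(fld.lower() for i, fld in enumerate(fields) if i != 2)
        let album' := (if lyr ≠ [] then [] else album) ++
          PySem.Chars.join []
            (((PySem.List.enumerate fields).filter (fun p => p.1 ≠ 2)).map
              (fun p => PySem.Chars.lower p.2))
        (disc'.insert (String.ofList album') PySem.Dict.empty, songT, album',
         (if lyr ≠ [] then [] else song), [])
      else if c = '*' then
        let disc' := if lyr ≠ [] then pvB_flush disc album song lyr else disc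
        let fields := pvB_fields x
        -- fields[0] (split never returns an empty list, so getD 0 is fields[0])
        let song' := (if lyr ≠ [] then [] else song) ++ PySem.Chars.lower (fields.getD 0 [])
        let long := (if 4 < fields.length then fields.getD 4 [] else []) ++
                    (if 5 < fields.length then fields.getD 5 [] else [])
        let lyr' := (if 7 < fields.length then PySem.Chars.lower (fields.getD 7 []) else []) ++ [' ']
        (disc'.modify (String.ofList album) PySem.Dict.empty
           (fun d => d.insert (String.ofList song') none),
         songT.insert (String.ofList song') (String.ofList (long.take 2 ++ [':'] ++ long.drop 2)),
         album, song', lyr')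
      else
        -- lyrics += x[:-1].lower() + ' '
        (disc, songT, album, song,
         lyr ++ PySem.Chars.lower (PySem.List.slice x.toList none (some (-1))) ++ [' '])

def discographyGenerator_alt (f : List String) : (List (String × List (String × Option String))) × (List (String × String)) :=
  match f.foldl pvB_line (PySem.Dict.empty, PySem.Dict.empty, [], [], []) with
  | (disc, songT, album, song, lyr) =>
    let disc' := if lyr ≠ [] then pvB_flush disc album song lyr else disc
    (disc'.items.map (fun p => (p.1, p.2.items)), songT.items)

-- ===== PRECONDITION & SPEC =====
-- Pre_ excludes exactly the inputs where Python A raises: an empty line (IndexError on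
-- x[0]) or a file whose first line is not a '#' album line (KeyError on discography['']).
def Pre_discographyGenerator (f : List String) : Prop :=
  (∀ x ∈ f, x.toList ≠ []) ∧ (f.headD "#").toList.head? = some '#'
instance (f : List String) : Decidable (Pre_discographyGenerator f) := by unfold Pre_discographyGenerator; infer_instance

def pvWitness_discographyGenerator : List String :=
  ["#Speak:1967:z:\n", "*Lucifer Sam:a:b:c:03:07:x:doo doo:\n"]

def Spec_discographyGenerator (f : List String) (out : (List (String × List (String × Option String))) × (List (String × String))) : Prop := out = discographyGenerator_alt f
instance (f : List String) (out : (List (String × List (String × Option String))) × (List (String × String))) : Decidable (Spec_discographyGenerator f out) := by unfold Spec_discographyGenerator; infer_instance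

-- ===== CLAIM (what is proved, stated in full; the proofs are below) =====
def Claim_equal_discographyGenerator : Prop := ∀ (f : List String), Dom_discographyGenerator f → Pre_discographyGenerator f → Spec_discographyGenerator f (discographyGenerator f)

-- ===== LEMMAS AND PROOFS =====

-- PySem.Chars.splitOn with a single-character separator is Mathlib's List.splitOn.
theorem pv_go_colon (fuel : Nat) (l cur : List Char) (acc : List (List Char)) (h : l.length < fuel) :
    PySem.Chars.splitOn.go [':'] fuel l cur acc
      = acc.reverse ++ (List.splitOnP (· == ':') l).modifyHead (cur.reverse ++ ·) := by
  induction fuel generalizing l cur acc with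
  | zero => omega
  | succ n ih =>
    cases l with
    | nil => simp [PySem.Chars.splitOn.go, List.splitOnP_nil]
    | cons c rest =>
      by_cases hc : c = ':'
      · subst hc
        simp only [PySem.Chars.splitOn.go, List.isPrefixOf, BEq.rfl, Bool.true_and, if_pos,
          List.length_cons, List.length_nil, Nat.zero_add, List.drop_succ_cons, List.drop_zero]
        rw [ih rest [] (cur.reverse :: acc) (by simpa using Nat.lt_of_succ_lt_succ h)]
        rw [List.splitOnP_cons]
        simp only [BEq.rfl, if_pos, List.modifyHead_cons, List.reverse_cons, List.reverse_nil,
          List.nil_append, List.append_assoc, List.singleton_append]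
        cases hG : List.splitOnP (fun x => x == ':') rest <;> simp
      · simp only [PySem.Chars.splitOn.go]
        rw [if_neg (by simp [List.isPrefixOf]; exact fun hh => (hc hh.symm).elim)]
        rw [ih rest (c :: cur) acc (by simpa using Nat.lt_of_succ_lt_succ h)]
        rw [List.splitOnP_cons, if_neg (by simp [hc])]
        rw [List.modifyHead_modifyHead]
        have : ((fun x => cur.reverse ++ x) ∘ List.cons c) = (fun x => (c :: cur).reverse ++ x) := by
          funext x; simp
        rw [this]

theorem pv_splitOn_colon (s : List Char) :
    PySem.Chars.splitOn s [':'] = s.splitOn ':' := by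
  unfold PySem.Chars.splitOn List.splitOn
  rw [pv_go_colon _ _ _ _ (by omega)]
  cases hG : List.splitOnP (fun x => x == ':') s <;> simp

theorem pv_splitOn_cons_self (t : List Char) : (':' :: t).splitOn ':' = [] :: t.splitOn ':' := by
  simp [List.splitOn, List.splitOnP_cons]

theorem pv_splitOn_cons_ne (c : Char) (t : List Char) (hc : c ≠ ':') :
    (c :: t).splitOn ':' = (t.splitOn ':').modifyHead (c :: ·) := by
  simp [List.splitOn, List.splitOnP_cons, hc]

theorem pv_splitOn_ne_nil (l : List Char) : l.splitOn ':' ≠ [] := List.splitOnP_ne_nil _ l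

-- what the '#' loop collects from the fields, starting at flag k
def pvGather (k : Nat) : List (List Char) → List Char
  | [] => []
  | fld :: rest => (if k = 2 then [] else PySem.Chars.lower fld) ++ pvGather (k + 1) rest

theorem pvGather_modifyHead (k : Nat) (c : Char) (G : List (List Char)) (hG : G ≠ []) :
    pvGather k (G.modifyHead (c :: ·))
      = (if k = 2 then [] else [PySem.Chars.lowerChar c]) ++ pvGather k G := by
  cases G with
  | nil => exact (hG rfl).elim
  | cons g gs =>
    simp only [List.modifyHead_cons, pvGather, PySem.Chars.lower]
    split_ifs <;> simp

theorem pv_hash_loop (s : List Char) (al : List Char) (k : Nat) :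
    s.foldl pvA_hashStep (al, k)
      = (al ++ pvGather k (s.splitOn ':'), k + s.count ':') := by
  induction s generalizing al k with
  | nil => simp [pvGather, List.splitOn, PySem.Chars.lower]
  | cons c t ih =>
    by_cases hc : c = ':'
    · subst hc
      simp only [List.foldl_cons, pvA_hashStep, if_true]
      rw [ih al (k + 1), pv_splitOn_cons_self]
      simp only [pvGather, PySem.Chars.lower]
      simp
      omega
    · simp only [List.foldl_cons, pvA_hashStep, if_neg hc]
      rw [pv_splitOn_cons_ne c t hc, pvGather_modifyHead k c _ (pv_splitOn_ne_nil t)]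
      by_cases hk : k = 2
      · simp only [hk, if_true]
        rw [ih al 2]
        simp [hc]
      · simp only [if_neg hk]
        rw [ih (al ++ [PySem.Chars.lowerChar c]) k]
        simp [hc]

-- what the '*' loop collects from the fields, starting at flag k
def pvSel (k : Nat) : List (List Char) → List Char × List Char × List Char
  | [] => ([], [], [])
  | fld :: rest =>
    let r := pvSel (k + 1) rest
    ((if k = 0 then PySem.Chars.lower fld else []) ++ r.1,
     (if k = 4 ∨ k = 5 then fld else []) ++ r.2.1,
     (if k = 7 then PySem.Chars.lower fld else []) ++ r.2.2)

theorem pvSel_modifyHead (k : Nat) (c : Char) (G : List (List Char)) (hG : G ≠ []) :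
    pvSel k (G.modifyHead (c :: ·))
      = ((if k = 0 then [PySem.Chars.lowerChar c] else []) ++ (pvSel k G).1,
         (if k = 4 ∨ k = 5 then [c] else []) ++ (pvSel k G).2.1,
         (if k = 7 then [PySem.Chars.lowerChar c] else []) ++ (pvSel k G).2.2) := by
  cases G with
  | nil => exact (hG rfl).elim
  | cons g gs =>
    simp only [List.modifyHead_cons, pvSel, PySem.Chars.lower]
    refine Prod.ext ?_ (Prod.ext ?_ ?_) <;> simp <;> split_ifs <;> simp

theorem pv_star_loop (s : List Char) (so lo ly : List Char) (k : Nat) :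
    s.foldl pvA_starStep ((so, lo, ly), k)
      = ((so ++ (pvSel k (s.splitOn ':')).1,
          lo ++ (pvSel k (s.splitOn ':')).2.1,
          ly ++ (pvSel k (s.splitOn ':')).2.2), k + s.count ':') := by
  induction s generalizing so lo ly k with
  | nil => simp [pvSel, List.splitOn, PySem.Chars.lower]
  | cons c t ih =>
    by_cases hc : c = ':'
    · subst hc
      simp only [List.foldl_cons, pvA_starStep, if_true]
      rw [ih so lo ly (k + 1), pv_splitOn_cons_self]
      simp only [pvSel]
      simp [PySem.Chars.lower]
      omega
    · simp only [List.foldl_cons, pvA_starStep, if_neg hc]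
      rw [pv_splitOn_cons_ne c t hc, pvSel_modifyHead k c _ (pv_splitOn_ne_nil t)]
      rcases Nat.lt_or_ge k 8 with hk | hk
      · interval_cases k <;>
          simp only [reduceIte] <;>
          rw [ih] <;> simp [hc]
      · have h0 : ¬ k = 0 := by omega
        have h45 : ¬ (k = 4 ∨ k = 5) := by omega
        have h7 : ¬ k = 7 := by omega
        simp only [if_neg h0, if_neg h45, if_neg h7]
        rw [ih so lo ly k]
        simp [hc]

theorem pv_sel_1 (F : List (List Char)) (k : Nat) :
    (pvSel k F).1 = if k = 0 then PySem.Chars.lower (F.getD 0 []) else [] := by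
  induction F generalizing k with
  | nil => simp [pvSel, PySem.Chars.lower]
  | cons fld rest ih =>
    simp only [pvSel, ih (k + 1), if_neg (by omega : ¬ k + 1 = 0)]
    by_cases hk : k = 0 <;> simp [hk]

theorem pv_sel_21 (F : List (List Char)) (k : Nat) :
    (pvSel k F).2.1 = (if k ≤ 4 then F.getD (4 - k) [] else []) ++
                      (if k ≤ 5 then F.getD (5 - k) [] else []) := by
  induction F generalizing k with
  | nil => simp [pvSel]
  | cons fld rest ih =>
    simp only [pvSel, ih (k + 1)]
    rcases Nat.lt_or_ge k 8 with hk | hk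
    · interval_cases k <;> simp [List.getD]
    · split_ifs <;> first | omega | simp_all

theorem pv_sel_22 (F : List (List Char)) (k : Nat) :
    (pvSel k F).2.2 = if k ≤ 7 then PySem.Chars.lower (F.getD (7 - k) []) else [] := by
  induction F generalizing k with
  | nil => simp [pvSel, PySem.Chars.lower]
  | cons fld rest ih =>
    simp only [pvSel, ih (k + 1)]
    rcases Nat.lt_or_ge k 8 with hk | hk
    · interval_cases k <;> simp [List.getD]
    · split_ifs <;> first | omega | simp_all

theorem pv_join_nil_cons (a : List Char) (L : List (List Char)) :
    PySem.Chars.join [] (a :: L) = a ++ PySem.Chars.join [] L := by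
  cases L with
  | nil => simp [PySem.Chars.join, List.intercalate]
  | cons b t => simp [PySem.Chars.join, List.intercalate, List.intersperse]

theorem pv_join_enum (F : List (List Char)) (j : Nat) :
    PySem.Chars.join []
        (((PySem.List.enumerate F (j : Int)).filter (fun p => p.1 ≠ 2)).map
          (fun p => PySem.Chars.lower p.2))
      = pvGather j F := by
  induction F generalizing j with
  | nil => simp [PySem.List.enumerate, pvGather, PySem.Chars.join, List.intercalate]
  | cons fld rest ih =>
    have henum : PySem.List.enumerate (fld :: rest) (j : Int)
        = ((j : Int), fld) :: PySem.List.enumerate rest (((j + 1 : Nat) : Int)) := by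
      show _ = _ :: PySem.List.enumerate rest _
      push_cast
      rfl
    rw [henum, List.filter_cons]
    by_cases hj : j = 2
    · subst hj
      rw [if_neg (by simp)]
      simpa [pvGather] using ih 3
    · have hj' : ((j : Int) ≠ 2) := by exact_mod_cast hj
      rw [if_pos (by simp [hj']), List.map_cons, pv_join_nil_cons, ih (j + 1)]
      simp [pvGather, hj]

-- out-of-range getD is already the default
theorem pv_getD_if (F : List (List Char)) (i : Nat) :
    (if i < F.length then F.getD i [] else []) = F.getD i [] := by
  split_ifs with h
  · rfl
  · exact (List.getD_eq_default _ _ (by omega)).symm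

theorem pv_lower_getD_if (F : List (List Char)) (i : Nat) :
    (if i < F.length then PySem.Chars.lower (F.getD i []) else [])
      = PySem.Chars.lower (F.getD i []) := by
  split_ifs with h
  · rfl
  · rw [List.getD_eq_default _ _ (by omega)]
    simp [PySem.Chars.lower]

-- embedding of B's loop state into A's (A additionally carries long = '' and flag = 0)
def pvEmbed
    (st : PySem.Dict String (PySem.Dict String (Option String)) × PySem.Dict String String ×
          List Char × List Char × List Char) :
    PySem.Dict String (PySem.Dict String (Option String)) × PySem.Dict String String ×
      List Char × List Char × List Char × List Char × Nat :=
  (st.1, st.2.1, st.2.2.1, st.2.2.2.1, st.2.2.2.2, [], 0)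

-- one line of A, started with long = '' and flag = 0, is one line of B
theorem pv_line (st : PySem.Dict String (PySem.Dict String (Option String)) ×
    PySem.Dict String String × List Char × List Char × List Char) (x : String) :
    pvA_line (pvEmbed st) x = pvEmbed (pvB_line st x) := by
  obtain ⟨d, t, al, so, ly⟩ := st
  show pvA_line (d, t, al, so, ly, [], 0) x = pvEmbed (pvB_line (d, t, al, so, ly) x)
  unfold pvA_line pvB_line pvB_fields
  cases hx : x.toList with
  | nil => rfl
  | cons c cs =>
    by_cases hc : c = '#'
    · subst hc
      simp only [if_true, pv_splitOn_colon]
      rw [pv_hash_loop]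
      have hje := pv_join_enum
        (List.splitOn ':' (PySem.List.slice ('#' :: cs) (some 1) (some (-1)))) 0
      rw [Nat.cast_zero] at hje
      rw [hje]
      simp [pvEmbed, pvA_flush, pvB_flush]
    · by_cases hs : c = '*'
      · subst hs
        simp only [if_neg hc, if_true, pv_splitOn_colon]
        rw [pv_star_loop, pv_sel_1, pv_sel_21, pv_sel_22]
        simp only [Nat.sub_zero, Nat.zero_le, if_true, pv_getD_if, pv_lower_getD_if]
        simp [pvEmbed, pvA_flush, pvB_flush]
      · simp only [if_neg hc, if_neg hs]
        rw [PySem.List.foldl_append_singleton_eq_map]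
        simp [pvEmbed, PySem.Chars.lower]

-- ===== VERDICT (by name: the statement is the Claim_ definition above) =====
theorem discographyGenerator_spec : Claim_equal_discographyGenerator := by
  intro f _ _
  unfold Spec_discographyGenerator discographyGenerator discographyGenerator_alt
  have h := List.foldl_hom pvEmbed (g₁ := pvB_line) (g₂ := pvA_line)
      (l := f) (init := (PySem.Dict.empty, PySem.Dict.empty, [], [], []))
      (fun s x => pv_line s x)
  have h0 : pvEmbed (PySem.Dict.empty, PySem.Dict.empty, [], [], [])
      = (PySem.Dict.empty, PySem.Dict.empty, [], [], [], [], 0) := rfl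
  rw [h0] at h
  rw [h]
  rcases List.foldl pvB_line (PySem.Dict.empty, PySem.Dict.empty, [], [], []) f with
    ⟨d, t, al, so, ly⟩
  simp [pvEmbed, pvA_flush, pvB_flush]
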